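-- pv_equiv track=rewrite | github.com/prakratt/game_theory_evals | prisoners_dilemma/scorer.py | detect_strategy
-- ===== SOURCE A (Python) =====
-- def detect_strategy(choices: list[str], partner_choices: list[str]) -> str:
--     """Attempt to classify the strategy used by a player."""
--     n = len(choices)
--     if n == 0:
--         return "unknown"
--     if n == 1:
--         return f"single_{choices[0]}"
--
--     all_coop = all(c == "cooperate" for c in choices)
--     all_defect = all(c == "defect" for c in choices)
--
--     if all_coop:
--         return "always_cooperate"
--     if all_defect:
--         return "always_defect"
--
--     # Tit-for-tat: first round cooperate, then copy partner's previous move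
--     is_tft = choices[0] == "cooperate" and all(
--         choices[i] == partner_choices[i - 1] for i in range(1, n)
--     )
--     if is_tft:
--         return "tit_for_tat"
--
--     # Suspicious tit-for-tat: first round defect, then copy partner's previous move
--     is_stft = choices[0] == "defect" and all(
--         choices[i] == partner_choices[i - 1] for i in range(1, n)
--     )
--     if is_stft:
--         return "suspicious_tit_for_tat"
--
--     # Defect on last round only
--     if all(c == "cooperate" for c in choices[:-1]) and choices[-1] == "defect":
--         return "defect_last_round"
--
--     # Cooperate then defect (starts cooperating, switches to defecting)
--     first_defect = next((i for i, c in enumerate(choices) if c == "defect"), n)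
--     if first_defect > 0 and all(c == "defect" for c in choices[first_defect:]):
--         return "cooperate_then_defect"
--
--     # Grim trigger: cooperates until partner defects, then always defects
--     partner_first_defect = next(
--         (i for i, c in enumerate(partner_choices) if c == "defect"), n
--     )
--     if partner_first_defect < n:
--         before_ok = all(c == "cooperate" for c in choices[: partner_first_defect + 1])
--         after_ok = all(c == "defect" for c in choices[partner_first_defect + 1 :])
--         if before_ok and after_ok and partner_first_defect + 1 < n:
--             return "grim_trigger"
--
--     return "mixed"
-- ===== SOURCE B (Python) =====
-- def detect_strategy(choices: list[str], partner_choices: list[str]) -> str: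
--     """Classify strategy: one forward pass builds a feature table, then a
--     numeric dispatch chain reads it (no slices, no repeated scans)."""
--     n = len(choices)
--     if n == 0:
--         return "unknown"
--     if n == 1:
--         return "single_" + choices[0]
--
--     m = len(partner_choices)
--     # feature table, filled in a single forward pass over the rounds
--     first_noncoop = n      # first index i with choices[i] != "cooperate"
--     first_defect = n       # first index i with choices[i] == "defect"
--     last_nondefect = -1    # last index i with choices[i] != "defect"
--     mirrors = True         # choices[i] == partner_choices[i-1] for all i in 1..n-1 (in bounds)
--     for i, c in enumerate(choices):
--         if c != "cooperate" and first_noncoop == n: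
--             first_noncoop = i
--         if c == "defect" and first_defect == n:
--             first_defect = i
--         if c != "defect":
--             last_nondefect = i
--         if i >= 1 and not (i - 1 < m and c == partner_choices[i - 1]):
--             mirrors = False
--     partner_first_defect = n
--     for j, c in enumerate(partner_choices):
--         if c == "defect":
--             partner_first_defect = j
--             break
--
--     # priority dispatch on the feature table
--     if first_noncoop == n:
--         return "always_cooperate"
--     if last_nondefect < 0:
--         return "always_defect"
--     if choices[0] == "cooperate" and mirrors:
--         return "tit_for_tat"
--     if choices[0] == "defect" and mirrors:
--         return "suspicious_tit_for_tat"
--     if first_noncoop == n - 1 and choices[n - 1] == "defect":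
--         return "defect_last_round"
--     if first_defect > 0 and last_nondefect < first_defect:
--         return "cooperate_then_defect"
--     if (partner_first_defect < n and first_noncoop > partner_first_defect
--             and last_nondefect <= partner_first_defect
--             and partner_first_defect + 1 < n):
--         return "grim_trigger"
--     return "mixed"
-- ===== Notes on version B (the rewrite author's own statement) =====
-- stated objective: alternative
-- what changed: A re-scans the move list for every candidate strategy (repeated all() passes, slices and next() searches); B makes one forward pass that builds a feature table (first non-cooperate index, first defect index, last non-defect index, a bounds-checked mirror flag) plus one partner scan, and classifies with a chain of integer comparisons on those features.
import Mathlib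
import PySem

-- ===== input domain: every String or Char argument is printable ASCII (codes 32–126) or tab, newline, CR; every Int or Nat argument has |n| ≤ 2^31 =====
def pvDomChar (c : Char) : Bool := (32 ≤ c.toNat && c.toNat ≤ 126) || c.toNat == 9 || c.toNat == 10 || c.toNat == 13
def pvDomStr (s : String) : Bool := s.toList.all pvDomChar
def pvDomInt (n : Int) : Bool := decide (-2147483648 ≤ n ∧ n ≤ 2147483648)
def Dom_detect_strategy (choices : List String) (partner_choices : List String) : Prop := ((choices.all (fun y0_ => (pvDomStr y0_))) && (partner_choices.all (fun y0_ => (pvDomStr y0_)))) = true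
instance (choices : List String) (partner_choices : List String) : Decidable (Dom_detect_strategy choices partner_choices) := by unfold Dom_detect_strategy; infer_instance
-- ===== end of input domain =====

-- B replaces A's repeated scans and slices by one forward pass that builds a feature
-- table (first non-cooperate index, first defect index, last non-defect index, a
-- bounds-checked mirror flag, partner's first defect) read by a numeric dispatch chain
-- (objective: alternative decomposition, similar cost).


-- ===== PORT A =====
-- the generator `all(choices[i] == partner_choices[i-1] for i in range(1, n))`:
-- none = the IndexError Python raises when partner_choices[i-1] is out of range
def aMirror (c p : List String) : List Nat → Option Bool
  | [] => some true
  | i :: rest =>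
    match PySem.List.pyGet? p ((i : Int) - 1) with
    | none => none
    | some v => if c.getD i "" == v then aMirror c p rest else some false

-- `next((i for i, x in enumerate(l) if pred(x)), d)`
def aFirstIdx (pred : String → Bool) (d : Nat) : List String → Nat → Nat
  | [], _ => d
  | x :: xs, i => if pred x then i else aFirstIdx pred d xs (i + 1)

def detect_strategy (choices : List String) (partner_choices : List String) : String :=
  let n := choices.length
  if n == 0 then "unknown"
  else if n == 1 then "single_" ++ choices.getD 0 ""
  else
    let all_coop := choices.all (fun c => c == "cooperate")
    let all_defect := choices.all (fun c => c == "defect")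
    if all_coop then "always_cooperate"
    else if all_defect then "always_defect"
    else
      -- Lean is total, so the shared generator is evaluated once here;
      -- `.getD false` is only reached with `none` outside Pre_ (A raises there)
      let mir := aMirror choices partner_choices (List.range' 1 (n - 1))
      if choices.getD 0 "" == "cooperate" && mir.getD false then "tit_for_tat"
      else if choices.getD 0 "" == "defect" && mir.getD false then "suspicious_tit_for_tat"
      else if (PySem.List.slice choices none (some (-1))).all (fun c => c == "cooperate")
              && PySem.List.pyGetD choices (-1) "" == "defect" then "defect_last_round"
      else
        let first_defect := aFirstIdx (fun c => c == "defect") n choices 0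
        if decide (0 < first_defect)
           && (PySem.List.slice choices (some (first_defect : Int)) none).all (fun c => c == "defect") then
          "cooperate_then_defect"
        else
          let pfd := aFirstIdx (fun c => c == "defect") n partner_choices 0
          if decide (pfd < n) then
            let before_ok := (PySem.List.slice choices none (some ((pfd : Int) + 1))).all (fun c => c == "cooperate")
            let after_ok := (PySem.List.slice choices (some ((pfd : Int) + 1)) none).all (fun c => c == "defect")
            if before_ok && after_ok && decide (pfd + 1 < n) then "grim_trigger" else "mixed"
          else "mixed"

-- ===== PORT B =====
-- the single forward pass: state = (first_noncoop, first_defect, last_nondefect, mirrors)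
def bLoop (pc : List String) (m n : Nat) : List String → Nat → Nat × Nat × Int × Bool → Nat × Nat × Int × Bool
  | [], _, st => st
  | c :: rest, i, (fnc, fd, lnd, mir) =>
      bLoop pc m n rest (i + 1)
        ((if c != "cooperate" && fnc == n then i else fnc),
         (if c == "defect" && fd == n then i else fd),
         (if c != "defect" then (i : Int) else lnd),
         (if decide (1 ≤ i) && !(decide (i - 1 < m) && c == pc.getD (i - 1) "") then false else mir))

-- the partner scan with `break`
def bPartnerLoop (n : Nat) : List String → Nat → Nat
  | [], _ => n
  | c :: rest, j => if c == "defect" then j else bPartnerLoop n rest (j + 1)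

def detect_strategy_alt (choices : List String) (partner_choices : List String) : String :=
  let n := choices.length
  if n == 0 then "unknown"
  else if n == 1 then "single_" ++ choices.getD 0 ""
  else
    let m := partner_choices.length
    let st := bLoop partner_choices m n choices 0 (n, n, -1, true)
    let fnc := st.1
    let fd := st.2.1
    let lnd := st.2.2.1
    let mir := st.2.2.2
    let pfd := bPartnerLoop n partner_choices 0
    if fnc == n then "always_cooperate"
    else if decide (lnd < 0) then "always_defect"
    else if choices.getD 0 "" == "cooperate" && mir then "tit_for_tat"
    else if choices.getD 0 "" == "defect" && mir then "suspicious_tit_for_tat"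
    else if fnc == n - 1 && choices.getD (n - 1) "" == "defect" then "defect_last_round"
    else if decide (0 < fd) && decide (lnd < (fd : Int)) then "cooperate_then_defect"
    else if decide (pfd < n) && decide (pfd < fnc) && decide (lnd ≤ (pfd : Int)) && decide (pfd + 1 < n) then "grim_trigger"
    else "mixed"

-- ===== PRECONDITION & SPEC =====
-- Pre_ excludes exactly the inputs where A raises IndexError: a list of ≥ 2 moves,
-- neither all-cooperate nor all-defect, whose first move is cooperate/defect, with
-- partner_choices shorter than n-1 and agreeing with the mirror pattern as far as it reaches.
def Pre_detect_strategy (choices : List String) (partner_choices : List String) : Prop :=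
  ¬ (2 ≤ choices.length ∧
     (choices.getD 0 "" = "cooperate" ∨ choices.getD 0 "" = "defect") ∧
     (∃ x ∈ choices, x ≠ "cooperate") ∧ (∃ x ∈ choices, x ≠ "defect") ∧
     partner_choices.length + 1 < choices.length ∧
     ∀ i ∈ List.range' 1 partner_choices.length, choices.getD i "" = partner_choices.getD (i - 1) "")

instance (choices : List String) (partner_choices : List String) : Decidable (Pre_detect_strategy choices partner_choices) := by
  unfold Pre_detect_strategy; infer_instance

def pvWitness_detect_strategy : List String × List String := (["cooperate", "defect"], ["defect"])

def Spec_detect_strategy (choices : List String) (partner_choices : List String) (out : String) : Prop := out = detect_strategy_alt choices partner_choices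
instance (choices : List String) (partner_choices : List String) (out : String) : Decidable (Spec_detect_strategy choices partner_choices out) := by unfold Spec_detect_strategy; infer_instance

-- ===== CLAIM (what is proved, stated in full; the proofs are below) =====
def Claim_equal_detect_strategy : Prop := ∀ (choices : List String) (partner_choices : List String), Dom_detect_strategy choices partner_choices → Pre_detect_strategy choices partner_choices → Spec_detect_strategy choices partner_choices (detect_strategy choices partner_choices)



-- ===== LEMMAS AND PROOFS =====

theorem aFirstIdx_eq (pred : String → Bool) (d : Nat) :
    ∀ (l : List String) (i : Nat),
      aFirstIdx pred d l i = if l.findIdx pred < l.length then i + l.findIdx pred else d := by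
  intro l
  induction l with
  | nil => intro i; simp [aFirstIdx]
  | cons x xs ih =>
    intro i
    by_cases h : pred x
    · simp [aFirstIdx, h, List.findIdx_cons]
    · simp only [aFirstIdx, if_false, Bool.false_eq_true, ih, List.findIdx_cons, h,
        cond_false, List.length_cons]
      by_cases h2 : xs.findIdx pred < xs.length
      · simp [h2]; omega
      · have : ¬ (xs.findIdx pred + 1 < xs.length + 1) := by omega
        simp [h2, this]


theorem bLoop_fnc (pc : List String) (m n : Nat) :
    ∀ (l : List String) (i : Nat) (f d : Nat) (ln : Int) (mi : Bool),
      i + l.length ≤ n →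
      (bLoop pc m n l i (f, d, ln, mi)).1 =
        if f = n then (if l.findIdx (fun c => c != "cooperate") < l.length
                       then i + l.findIdx (fun c => c != "cooperate") else n)
        else f := by
  intro l
  induction l with
  | nil => intro i f d ln mi _; simp [bLoop]
  | cons c rest ih =>
    intro i f d ln mi hle
    simp only [List.length_cons] at hle
    by_cases hf : f = n
    · by_cases hc : (c != "cooperate")
      · have hin : i ≠ n := by omega
        simp only [bLoop, hc, hf, beq_self_eq_true, Bool.and_self, if_pos]
        rw [ih _ _ _ _ _ (by omega)]
        simp [hin, List.findIdx_cons, hc]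
      · simp only [bLoop, hc, Bool.false_and, if_false, Bool.false_eq_true]
        rw [ih _ _ _ _ _ (by omega)]
        simp only [List.findIdx_cons, hc, cond_false, hf, if_pos, List.length_cons]
        by_cases h2 : rest.findIdx (fun c => c != "cooperate") < rest.length
        · simp [h2]; omega
        · have : ¬ (rest.findIdx (fun c => c != "cooperate") + 1 < rest.length + 1) := by omega
          simp [h2, this]
    · have : (f == n) = false := by simp [hf]
      simp only [bLoop, this, Bool.and_false, if_false, Bool.false_eq_true]
      rw [ih _ _ _ _ _ (by omega)]
      simp [hf]

theorem bLoop_fd (pc : List String) (m n : Nat) :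
    ∀ (l : List String) (i : Nat) (f d : Nat) (ln : Int) (mi : Bool),
      i + l.length ≤ n →
      (bLoop pc m n l i (f, d, ln, mi)).2.1 =
        if d = n then (if l.findIdx (fun c => c == "defect") < l.length
                       then i + l.findIdx (fun c => c == "defect") else n)
        else d := by
  intro l
  induction l with
  | nil => intro i f d ln mi _; simp [bLoop]
  | cons c rest ih =>
    intro i f d ln mi hle
    simp only [List.length_cons] at hle
    by_cases hd : d = n
    · by_cases hc : (c == "defect")
      · have hin : i ≠ n := by omega
        simp only [bLoop, hc, hd, beq_self_eq_true, Bool.and_self, if_pos]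
        rw [ih _ _ _ _ _ (by omega)]
        simp [hin, List.findIdx_cons, hc]
      · simp only [bLoop, hc, Bool.false_and, if_false, Bool.false_eq_true]
        rw [ih _ _ _ _ _ (by omega)]
        simp only [List.findIdx_cons, hc, cond_false, hd, if_pos, List.length_cons]
        by_cases h2 : rest.findIdx (fun c => c == "defect") < rest.length
        · simp [h2]; omega
        · have : ¬ (rest.findIdx (fun c => c == "defect") + 1 < rest.length + 1) := by omega
          simp [h2, this]
    · have : (d == n) = false := by simp [hd]
      simp only [bLoop, this, Bool.and_false, if_false, Bool.false_eq_true]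
      rw [ih _ _ _ _ _ (by omega)]
      simp [hd]

theorem bLoop_lnd (pc : List String) (m n : Nat) :
    ∀ (l : List String) (i : Nat) (f d : Nat) (ln : Int) (mi : Bool) (k : Nat),
      ln < (i : Int) →
      ((bLoop pc m n l i (f, d, ln, mi)).2.2.1 < (k : Int) ↔
        ln < (k : Int) ∧ (l.drop (k - i)).all (fun c => c == "defect") = true) := by
  intro l
  induction l with
  | nil => intro i f d ln mi k _; simp [bLoop]
  | cons c rest ih =>
    intro i f d ln mi k hln
    by_cases hc : (c == "defect")
    · have hc' : (c != "defect") = false := by simp_all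
      simp only [bLoop, hc', Bool.false_eq_true, if_false]
      rw [ih _ _ _ _ _ k (by omega)]
      by_cases hik : i < k
      · have : k - i = (k - (i+1)) + 1 := by omega
        rw [this]
        simp
      · have h0 : k - i = 0 := by omega
        have h1 : k - (i+1) = 0 := by omega
        rw [h0, h1]
        simp only [List.drop_zero, List.all_cons, hc, Bool.true_and]
    · simp only [bLoop, bne, hc, Bool.not_false, if_pos]
      rw [ih _ _ _ _ _ k (by omega)]
      by_cases hik : i < k
      · have : k - i = (k - (i+1)) + 1 := by omega
        rw [this]
        have h2 : (i:Int) < k := by omega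
        have h3 : ln < (k:Int) := by omega
        simp [h2, h3]
      · have h0 : k - i = 0 := by omega
        have h1 : k - (i+1) = 0 := by omega
        rw [h0, h1]
        have h2 : ¬ ((i:Int) < k) := by omega
        simp only [List.drop_zero, List.all_cons, hc, Bool.false_and]
        simp [h2]


theorem bLoop_mir (pc : List String) (m n : Nat) :
    ∀ (l : List String) (i : Nat) (f d : Nat) (ln : Int) (mi : Bool),
      ((bLoop pc m n l i (f, d, ln, mi)).2.2.2 = true ↔
        mi = true ∧ ∀ j, j < l.length → 1 ≤ i + j →
          (i + j - 1 < m ∧ l.getD j "" = pc.getD (i + j - 1) "")) := by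
  intro l
  induction l with
  | nil => intro i f d ln mi; simp [bLoop]
  | cons c rest ih =>
    intro i f d ln mi
    simp only [bLoop]
    rw [ih]
    constructor
    · rintro ⟨hmi', hrest⟩
      split_ifs at hmi' with hcond
      · refine ⟨hmi', ?_⟩
        intro j hj h1
        cases j with
        | zero =>
          simp only [Nat.add_zero] at h1 ⊢
          simp [h1] at hcond
          simpa using hcond
        | succ j' =>
          have hj' : j' < rest.length := by simpa using hj
          have h := hrest j' hj' (by omega)
          have he : i + 1 + j' - 1 = i + (j' + 1) - 1 := by omega
          refine ⟨by omega, ?_⟩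
          simpa [he] using h.2
    · rintro ⟨hmi, hall⟩
      constructor
      · split_ifs with hcond
        · exfalso
          simp only [Bool.and_eq_true, decide_eq_true_eq] at hcond
          obtain ⟨h1i, hbad⟩ := hcond
          have h0 := hall 0 (by simp) (by omega)
          simp only [Nat.add_zero, List.getD_cons_zero] at h0
          simp [h0.1, h0.2] at hbad
        · exact hmi
      · intro j hj h1
        have hj1 : j + 1 < (c :: rest).length := by simpa using hj
        have h := hall (j + 1) hj1 (by omega)
        have he : i + (j + 1) - 1 = i + 1 + j - 1 := by omega
        refine ⟨by omega, ?_⟩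
        have h2 := h.2
        simp only [List.getD_cons_succ] at h2
        rw [he] at h2
        exact h2

theorem aMirror_some (c p : List String) :
    ∀ (l : List Nat), (∀ i ∈ l, 1 ≤ i) → ∀ b, aMirror c p l = some b →
      (b = true ↔ ∀ i ∈ l, (i - 1 < p.length ∧ c.getD i "" = p.getD (i - 1) "")) := by
  intro l
  induction l with
  | nil => intro _ b hb; simp [aMirror] at hb; simp [hb.symm]
  | cons i rest ih =>
    intro h1 b hb
    have hi1 : 1 ≤ i := h1 i (by simp)
    simp only [aMirror] at hb
    rcases hg : PySem.List.pyGet? p ((i : Int) - 1) with _ | v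
    · rw [hg] at hb; simp at hb
    · rw [hg] at hb
      dsimp only at hb
      have hcast : ((i : Int) - 1) = ((i - 1 : Nat) : Int) := by omega
      rw [hcast, PySem.List.pyGet?_natCast] at hg
      have him : i - 1 < p.length := by
        by_contra hno
        rw [List.getElem?_eq_none (by omega)] at hg
        simp at hg
      have hv : v = p.getD (i-1) "" := by
        rw [List.getElem?_eq_getElem him] at hg
        have := Option.some.inj hg
        simp [List.getD, ← this, List.getElem?_eq_getElem him]
      by_cases heq : c.getD i "" == v
      · rw [if_pos heq] at hb
        rw [ih (fun j hj => h1 j (by simp [hj])) b hb]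
        constructor
        · intro hall j hj
          rcases List.mem_cons.mp hj with rfl | hj'
          · exact ⟨him, by rw [hv] at heq; exact eq_of_beq heq⟩
          · exact hall j hj'
        · intro hall j hj
          exact hall j (List.mem_cons_of_mem _ hj)
      · rw [if_neg heq] at hb
        have hb' : b = false := (Option.some.inj hb).symm
        subst hb'
        simp only [Bool.false_eq_true, false_iff]
        intro hall
        have := (hall i (by simp)).2
        rw [hv] at heq
        refine heq ?_
        rw [this]
        simp
theorem aMirror_none (c p : List String) :
    ∀ (k a : Nat), 1 ≤ a → aMirror c p (List.range' a k) = none →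
      p.length + 1 < a + k ∧ ∀ i ∈ List.range' a k, i - 1 < p.length → c.getD i "" = p.getD (i - 1) "" := by
  intro k
  induction k with
  | zero => intro a _ h; simp [aMirror] at h
  | succ k' ih =>
    intro a ha h
    rw [List.range'_succ] at h
    simp only [aMirror] at h
    rcases hg : PySem.List.pyGet? p ((a : Int) - 1) with _ | v
    · -- out of range at the head: a - 1 ≥ p.length
      have hcast : ((a : Int) - 1) = ((a - 1 : Nat) : Int) := by omega
      rw [hcast, PySem.List.pyGet?_natCast] at hg
      have hge : p.length ≤ a - 1 := by
        by_contra hno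
        rw [List.getElem?_eq_getElem (by omega)] at hg
        simp at hg
      refine ⟨by omega, ?_⟩
      intro i hi him
      rw [List.mem_range'_1] at hi
      omega
    · rw [hg] at h
      dsimp only at h
      have hcast : ((a : Int) - 1) = ((a - 1 : Nat) : Int) := by omega
      rw [hcast, PySem.List.pyGet?_natCast] at hg
      have him : a - 1 < p.length := by
        by_contra hno
        rw [List.getElem?_eq_none (by omega)] at hg
        simp at hg
      have hv : v = p.getD (a-1) "" := by
        rw [List.getElem?_eq_getElem him] at hg
        have := Option.some.inj hg
        simp [List.getD, ← this, List.getElem?_eq_getElem him]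
      by_cases heq : c.getD a "" == v
      · rw [if_pos heq] at h
        obtain ⟨hb, hall⟩ := ih (a + 1) (by omega) h
        refine ⟨by omega, ?_⟩
        intro i hi hil
        rcases List.mem_cons.mp (by rw [← List.range'_succ]; exact hi) with rfl | hi'
        · rw [hv] at heq; exact eq_of_beq heq
        · exact hall i hi' hil
      · rw [if_neg heq] at h
        simp at h

theorem take_all_iff (l : List String) (pred : String → Bool) (k : Nat) :
    ((l.take k).all pred = true) ↔ min k l.length ≤ l.findIdx (fun c => !(pred c)) := by
  induction l generalizing k with
  | nil => simp
  | cons x xs ih =>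
    cases k with
    | zero => simp
    | succ k' =>
      simp only [List.take_succ_cons, List.all_cons, Bool.and_eq_true, List.findIdx_cons,
        List.length_cons, ih]
      by_cases hx : pred x
      · simp [hx]
      · simp [hx]



theorem tail_eq (c p : List String) (F D PF : Nat) (lnd : Int)
    (h2 : 2 ≤ c.length) (hne : c ≠ [])
    (hF : F = c.findIdx (fun x => x != "cooperate")) (hFne : F ≠ c.length)
    (hD : D = c.findIdx (fun x => x == "defect"))
    (hlnd : ∀ k : Nat, (lnd < (k : Int)) ↔ ((c.drop k).all fun x => x == "defect") = true)
    (hPF : aFirstIdx (fun x => x == "defect") c.length p 0 = PF) :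
    (if (((PySem.List.slice c none (some (-1))).all fun x => x == "cooperate")
          && PySem.List.pyGetD c (-1) "" == "defect") = true then "defect_last_round"
     else if (decide (0 < aFirstIdx (fun x => x == "defect") c.length c 0)
          && ((PySem.List.slice c (some ((aFirstIdx (fun x => x == "defect") c.length c 0 : Nat) : Int)) none).all fun x => x == "defect")) = true then "cooperate_then_defect"
     else if decide (aFirstIdx (fun x => x == "defect") c.length p 0 < c.length) = true then
       (if ((((PySem.List.slice c none (some ((aFirstIdx (fun x => x == "defect") c.length p 0 : Int) + 1))).all fun x => x == "cooperate")
             && ((PySem.List.slice c (some ((aFirstIdx (fun x => x == "defect") c.length p 0 : Int) + 1)) none).all fun x => x == "defect"))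
             && decide (aFirstIdx (fun x => x == "defect") c.length p 0 + 1 < c.length)) = true then "grim_trigger"
        else "mixed")
     else "mixed")
    =
    (if (F == c.length - 1 && c.getD (c.length - 1) "" == "defect") = true then "defect_last_round"
     else if (decide (0 < D) && decide (lnd < (D : Int))) = true then "cooperate_then_defect"
     else if (decide (PF < c.length) && decide (PF < F) && decide (lnd ≤ (PF : Int)) && decide (PF + 1 < c.length)) = true then "grim_trigger"
     else "mixed") := by
  have hFle : c.findIdx (fun x => x != "cooperate") ≤ c.length := List.findIdx_le_length
  have hDle : c.findIdx (fun x => x == "defect") ≤ c.length := List.findIdx_le_length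
  have hDa : aFirstIdx (fun x => x == "defect") c.length c 0 = D := by
    rw [aFirstIdx_eq, hD]; split_ifs <;> omega
  rw [hPF, hDa]
  -- defect_last_round
  have hA5a : ((PySem.List.slice c none (some (-1))).all fun x => x == "cooperate") = true ↔
      c.length - 1 ≤ c.findIdx (fun x => x != "cooperate") := by
    rw [PySem.List.slice_to_neg_one, List.dropLast_eq_take, take_all_iff]
    have hm : min (c.length - 1) c.length = c.length - 1 := by omega
    rw [hm]
    rfl
  have hgd : PySem.List.pyGetD c (-1) "" = c.getD (c.length - 1) "" := by
    rw [PySem.List.pyGetD_neg_one c "" hne, List.getLast_eq_getElem]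
    exact (List.getD_eq_getElem c "" (by omega)).symm
  have e5 : (((PySem.List.slice c none (some (-1))).all fun x => x == "cooperate")
        && PySem.List.pyGetD c (-1) "" == "defect")
      = (F == c.length - 1 && c.getD (c.length - 1) "" == "defect") := by
    apply Bool.coe_iff_coe.mp
    simp only [Bool.and_eq_true]
    rw [hgd, hA5a]
    constructor
    · rintro ⟨hx, hy⟩
      exact ⟨by rw [Nat.beq_eq_true_eq]; omega, hy⟩
    · rintro ⟨hx, hy⟩
      rw [Nat.beq_eq_true_eq] at hx
      exact ⟨by omega, hy⟩
  rw [e5]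
  by_cases h5 : (F == c.length - 1 && c.getD (c.length - 1) "" == "defect") = true
  · simp only [h5, if_true]
  have h5' := eq_false_of_ne_true h5
  simp only [h5', Bool.false_eq_true, if_false]
  -- cooperate_then_defect
  have e6 : (decide (0 < D) && ((PySem.List.slice c (some ((D : Nat) : Int)) none).all fun x => x == "defect"))
      = (decide (0 < D) && decide (lnd < (D : Int))) := by
    apply Bool.coe_iff_coe.mp
    simp only [Bool.and_eq_true, decide_eq_true_eq]
    rw [PySem.List.slice_from_natCast c D]
    rw [← hlnd D]
  rw [e6]
  by_cases h6 : (decide (0 < D) && decide (lnd < (D : Int))) = true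
  · simp only [h6, if_true]
  have h6' := eq_false_of_ne_true h6
  simp only [h6', Bool.false_eq_true, if_false]
  -- grim_trigger
  by_cases hP : PF < c.length
  · rw [if_pos (by rw [decide_eq_true_eq]; exact hP)]
    have hcast : ((PF : Int) + 1) = ((PF + 1 : Nat) : Int) := by push_cast; ring
    have hbefore : ((PySem.List.slice c none (some ((PF : Int) + 1))).all fun x => x == "cooperate") = true ↔
        PF + 1 ≤ c.findIdx (fun x => x != "cooperate") := by
      rw [hcast, PySem.List.slice_to_natCast, take_all_iff]
      have hm : min (PF + 1) c.length = PF + 1 := by omega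
      rw [hm]
      rfl
    have hafter : ((PySem.List.slice c (some ((PF : Int) + 1)) none).all fun x => x == "defect") = true ↔
        lnd ≤ (PF : Int) := by
      rw [hcast, PySem.List.slice_from_natCast, ← hlnd (PF + 1)]
      constructor <;> intro h <;> [exact (by push_cast at h ⊢; omega); exact (by push_cast at h ⊢; omega)]
    have e7 : ((((PySem.List.slice c none (some ((PF : Int) + 1))).all fun x => x == "cooperate")
          && ((PySem.List.slice c (some ((PF : Int) + 1)) none).all fun x => x == "defect"))
          && decide (PF + 1 < c.length))
        = (decide (PF < c.length) && decide (PF < F) && decide (lnd ≤ (PF : Int)) && decide (PF + 1 < c.length)) := by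
      apply Bool.coe_iff_coe.mp
      simp only [Bool.and_eq_true, decide_eq_true_eq]
      rw [hbefore, hafter]
      constructor
      · rintro ⟨⟨hb, ha⟩, hl⟩
        exact ⟨⟨⟨hP, by omega⟩, ha⟩, hl⟩
      · rintro ⟨⟨⟨_, hbf⟩, ha⟩, hl⟩
        exact ⟨⟨by omega, ha⟩, hl⟩
    rw [e7]
  · rw [if_neg (by rw [decide_eq_true_eq]; exact hP),
        if_neg (by intro h; simp only [Bool.and_eq_true, decide_eq_true_eq] at h; exact hP h.1.1.1)]

theorem dispatch_eq (c p : List String) (h2 : 2 ≤ c.length)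
    (hpre : Pre_detect_strategy c p) :
    detect_strategy c p = detect_strategy_alt c p := by
  have h0 : (c.length == 0) = false := beq_eq_false_iff_ne.mpr (by omega)
  have h1 : (c.length == 1) = false := beq_eq_false_iff_ne.mpr (by omega)
  simp only [detect_strategy, detect_strategy_alt, h0, h1, Bool.false_eq_true, if_false]
  -- shorthand facts
  have hne : c ≠ [] := by intro h; subst h; simp at h2
  have hFle : c.findIdx (fun x => x != "cooperate") ≤ c.length := List.findIdx_le_length
  have hDle : c.findIdx (fun x => x == "defect") ≤ c.length := List.findIdx_le_length
  have hst1 : (bLoop p p.length c.length c 0 (c.length, c.length, -1, true)).1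
      = c.findIdx (fun x => x != "cooperate") := by
    rw [bLoop_fnc p p.length c.length c 0 _ _ _ _ (by omega)]
    split_ifs with hh hh' <;> omega
  have hst2 : (bLoop p p.length c.length c 0 (c.length, c.length, -1, true)).2.1
      = c.findIdx (fun x => x == "defect") := by
    rw [bLoop_fd p p.length c.length c 0 _ _ _ _ (by omega)]
    split_ifs with hh hh' <;> omega
  have hlnd : ∀ k : Nat, ((bLoop p p.length c.length c 0 (c.length, c.length, -1, true)).2.2.1 < (k : Int)) ↔
      (c.drop k).all (fun x => x == "defect") = true := by
    intro k
    rw [bLoop_lnd p p.length c.length c 0 _ _ _ _ k (by norm_num)]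
    constructor
    · exact fun h => by simpa using h.2
    · exact fun h => ⟨by omega, by simpa using h⟩
  have hmir : (bLoop p p.length c.length c 0 (c.length, c.length, -1, true)).2.2.2 = true ↔
      ∀ j, j < c.length → 1 ≤ j → (j - 1 < p.length ∧ c.getD j "" = p.getD (j - 1) "") := by
    rw [bLoop_mir]
    simp only [true_and, Nat.zero_add]
  have bPartnerLoop_eq : ∀ (l : List String) (j : Nat),
      bPartnerLoop c.length l j = if l.findIdx (fun x => x == "defect") < l.length then j + l.findIdx (fun x => x == "defect") else c.length := by
    intro l
    induction l with
    | nil => intro j; simp [bPartnerLoop]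
    | cons x xs ih =>
      intro j
      by_cases h : (x == "defect")
      · simp [bPartnerLoop, h, List.findIdx_cons]
      · simp only [bPartnerLoop, h, if_false, Bool.false_eq_true, ih, List.findIdx_cons,
          cond_false, List.length_cons]
        by_cases h2 : xs.findIdx (fun x => x == "defect") < xs.length
        · have h3 : xs.findIdx (fun x => x == "defect") + 1 < xs.length + 1 := by omega
          simp [h2, h3]; omega
        · have h3 : ¬ (xs.findIdx (fun x => x == "defect") + 1 < xs.length + 1) := by omega
          simp [h2, h3]
  have hpfdA : aFirstIdx (fun c => c == "defect") c.length p 0 = bPartnerLoop c.length p 0 := by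
    rw [aFirstIdx_eq, bPartnerLoop_eq]
  have hac : (c.all fun x => x == "cooperate") = true ↔ c.findIdx (fun x => x != "cooperate") = c.length := by
    rw [List.findIdx_eq_length, List.all_eq_true]
    simp
  have hbeq : ∀ a b : Bool, (a = true ↔ b = true) → a = b := fun a b h => Bool.coe_iff_coe.mp h
  set st := bLoop p p.length c.length c 0 (c.length, c.length, -1, true) with hstdef
  -- branch 1: always_cooperate
  by_cases hAC : c.findIdx (fun x => x != "cooperate") = c.length
  · have eA : (c.all fun x => x == "cooperate") = true := hac.mpr hAC
    have eB : (st.1 == c.length) = true := by rw [hst1, hAC]; simp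
    simp only [eA, eB, if_true]
  have eA1 : (c.all fun x => x == "cooperate") = false :=
    eq_false_of_ne_true (fun h => hAC (hac.mp h))
  have eB1 : (st.1 == c.length) = false := by
    rw [hst1]; exact beq_eq_false_iff_ne.mpr hAC
  simp only [eA1, eB1, Bool.false_eq_true, if_false]
  -- branch 2: always_defect
  by_cases hAD : (c.all fun x => x == "defect") = true
  · have eB : (decide (st.2.2.1 < 0)) = true := by
      rw [decide_eq_true_eq]
      exact_mod_cast (hlnd 0).mpr (by simpa using hAD)
    simp only [hAD, eB, if_true]
  have eA2 : (c.all fun x => x == "defect") = false := eq_false_of_ne_true hAD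
  have eB2 : (decide (st.2.2.1 < 0)) = false := by
    rw [decide_eq_false_iff_not]
    intro h
    exact hAD ((hlnd 0).mp (by exact_mod_cast h))
  simp only [eA2, eB2, Bool.false_eq_true, if_false]
  -- the mirror value agrees whenever A's generator does not raise
  have hmeq : (c.getD 0 "" == "cooperate") = true ∨ (c.getD 0 "" == "defect") = true →
      (aMirror c p (List.range' 1 (c.length - 1))).getD false = st.2.2.2 := by
    intro hhead
    rcases hmm : aMirror c p (List.range' 1 (c.length - 1)) with _ | b
    · exfalso
      obtain ⟨hlen, hall⟩ := aMirror_none c p (c.length - 1) 1 (le_refl 1) hmm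
      apply hpre
      refine ⟨h2, ?_, ?_, ?_, by omega, ?_⟩
      · rcases hhead with h | h
        · exact Or.inl (by simpa using h)
        · exact Or.inr (by simpa using h)
      · have hlt : c.findIdx (fun x => x != "cooperate") < c.length := by omega
        obtain ⟨x, hx, hpx⟩ := List.findIdx_lt_length.mp hlt
        exact ⟨x, hx, by simpa using hpx⟩
      · have : ¬ ∀ x ∈ c, (x == "defect") = true := by
          intro hax
          exact hAD (List.all_eq_true.mpr hax)
        rw [not_forall] at this
        obtain ⟨x, hx⟩ := this
        rw [Classical.not_imp] at hx
        exact ⟨x, hx.1, by simpa using hx.2⟩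
      · intro i hi
        rw [List.mem_range'_1] at hi
        exact hall i (by rw [List.mem_range'_1]; omega) (by omega)
    · have hb := aMirror_some c p (List.range' 1 (c.length - 1))
        (fun i hi => by rw [List.mem_range'_1] at hi; omega) b hmm
      apply hbeq
      rw [Option.getD_some, hb, hmir]
      constructor
      · intro hall j hj hj1
        have := hall j (by rw [List.mem_range'_1]; omega)
        exact ⟨this.1, this.2⟩
      · intro hall i hi
        rw [List.mem_range'_1] at hi
        exact hall i (by omega) (by omega)
  -- branch 3: tit_for_tat
  by_cases hC0 : (c.getD 0 "" == "cooperate") = true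
  · have e3 : (c.getD 0 "" == "cooperate" && (aMirror c p (List.range' 1 (c.length - 1))).getD false)
        = (c.getD 0 "" == "cooperate" && st.2.2.2) := by rw [hmeq (Or.inl hC0)]
    rw [e3]
    by_cases hM : (c.getD 0 "" == "cooperate" && st.2.2.2) = true
    · simp only [hM, if_true]
    have hM' := eq_false_of_ne_true hM
    simp only [hM', Bool.false_eq_true, if_false]
    -- stft guard is false on both sides: head is "cooperate", not "defect"
    have hC0d : (c.getD 0 "" == "defect") = false := by
      have := beq_iff_eq.mp hC0
      rw [beq_eq_false_iff_ne, this]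
      decide
    simp only [hC0d, Bool.false_and, Bool.false_eq_true, if_false]
    exact tail_eq c p st.1 st.2.1 (bPartnerLoop c.length p 0) st.2.2.1 h2 hne hst1 (by rw [hst1]; exact hAC) hst2 hlnd hpfdA
  · have hC0' := eq_false_of_ne_true hC0
    simp only [hC0', Bool.false_and, Bool.false_eq_true, if_false]
    -- branch 4: suspicious_tit_for_tat
    by_cases hC0d : (c.getD 0 "" == "defect") = true
    · have e4 : (c.getD 0 "" == "defect" && (aMirror c p (List.range' 1 (c.length - 1))).getD false)
          = (c.getD 0 "" == "defect" && st.2.2.2) := by rw [hmeq (Or.inr hC0d)]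
      rw [e4]
      by_cases hM : (c.getD 0 "" == "defect" && st.2.2.2) = true
      · simp only [hM, if_true]
      have hM' := eq_false_of_ne_true hM
      simp only [hM', Bool.false_eq_true, if_false]
      exact tail_eq c p st.1 st.2.1 (bPartnerLoop c.length p 0) st.2.2.1 h2 hne hst1 (by rw [hst1]; exact hAC) hst2 hlnd hpfdA
    · have hC0d' := eq_false_of_ne_true hC0d
      simp only [hC0d', Bool.false_and, Bool.false_eq_true, if_false]
      exact tail_eq c p st.1 st.2.1 (bPartnerLoop c.length p 0) st.2.2.1 h2 hne hst1 (by rw [hst1]; exact hAC) hst2 hlnd hpfdA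

-- ===== VERDICT (by name: the statement is the Claim_ definition above) =====
theorem detect_strategy_spec : Claim_equal_detect_strategy := by
  intro c p _ hpre
  unfold Spec_detect_strategy
  match c with
  | [] => rfl
  | [a] => rfl
  | a :: b :: t => exact dispatch_eq (a :: b :: t) p (by simp) hpre
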